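-- pv_equiv track=rewrite | github.com/aniketkatkar2003/Universal-Code-Template-Generator-API | src/type_mappers.py | get_imports
-- ===== SOURCE A (Python) =====
-- from typing import Dict, List
--
-- def get_imports(dsl_types: List[str]) -> List[str]:
--     imports = set()
--
--     for dsl_type in dsl_types:
--         if 'List' in dsl_type or '[]' in dsl_type:
--             imports.add('#include <vector>')
--         if 'string' in dsl_type:
--             imports.add('#include <string>')
--         if 'Graph' in dsl_type:
--             imports.add('#include <unordered_map>')
--             imports.add('#include <vector>')
--
--     return sorted(list(imports))
-- ===== SOURCE B (Python) =====
-- def get_imports(dsl_types):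
--     text = "\n".join(dsl_types)
--     out = []
--     if 'string' in text:
--         out.append('#include <string>')
--     if 'Graph' in text:
--         out.append('#include <unordered_map>')
--     if 'List' in text or '[]' in text or 'Graph' in text:
--         out.append('#include <vector>')
--     return out
-- ===== Notes on version B (the rewrite author's own statement) =====
-- stated objective: alternative
-- what changed: B joins all type names into one newline-separated text, does one substring search per pattern on that single text (no per-element loop, correct because no pattern contains the separator), and emits the includes directly in ASCII order instead of building a set and sorting it.
import Mathlib
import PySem

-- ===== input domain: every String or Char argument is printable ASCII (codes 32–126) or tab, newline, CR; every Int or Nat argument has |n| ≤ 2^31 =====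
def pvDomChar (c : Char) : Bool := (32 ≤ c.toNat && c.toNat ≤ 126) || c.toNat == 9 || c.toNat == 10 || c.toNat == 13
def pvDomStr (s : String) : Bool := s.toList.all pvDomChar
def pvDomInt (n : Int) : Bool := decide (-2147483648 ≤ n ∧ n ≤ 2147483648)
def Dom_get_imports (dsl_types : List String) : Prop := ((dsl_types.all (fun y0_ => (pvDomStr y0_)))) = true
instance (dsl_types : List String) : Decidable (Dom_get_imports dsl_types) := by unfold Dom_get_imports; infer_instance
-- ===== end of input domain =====

-- B joins all type names into one newline-separated text, does one substring search per pattern on that text (no per-element loop), and emits the includes directly in ASCII order instead of sorting a set (alternative decomposition, same cost).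


-- ===== PORT A =====
-- loop body of A: the three 'if' branches applied to the accumulator set, in order
def stepA (s : PySem.Set String) (t : String) : PySem.Set String :=
  let s := if PySem.Str.isIn "List" t || PySem.Str.isIn "[]" t then PySem.Set.add s "#include <vector>" else s
  let s := if PySem.Str.isIn "string" t then PySem.Set.add s "#include <string>" else s
  let s := if PySem.Str.isIn "Graph" t then
             PySem.Set.add (PySem.Set.add s "#include <unordered_map>") "#include <vector>"
           else s
  s

def get_imports (dsl_types : List String) : List String :=
  PySem.List.sorted (dsl_types.foldl stepA PySem.Set.empty) (fun x => x) false

-- ===== PORT B =====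
-- B: one joined text, one substring search per pattern, output appended in ASCII order
def get_imports_alt (dsl_types : List String) : List String :=
  let text := PySem.Str.join "\n" dsl_types
  let out : List String := []
  let out := if PySem.Str.isIn "string" text then out ++ ["#include <string>"] else out
  let out := if PySem.Str.isIn "Graph" text then out ++ ["#include <unordered_map>"] else out
  let out := if PySem.Str.isIn "List" text || PySem.Str.isIn "[]" text || PySem.Str.isIn "Graph" text then
               out ++ ["#include <vector>"] else out
  out

-- ===== PRECONDITION & SPEC =====
def Spec_get_imports (dsl_types : List String) (out : List String) : Prop := out = get_imports_alt dsl_types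
instance (dsl_types : List String) (out : List String) : Decidable (Spec_get_imports dsl_types out) := by unfold Spec_get_imports; infer_instance

-- ===== CLAIM (what is proved, stated in full; the proofs are below) =====
def Claim_equal_get_imports : Prop := ∀ (dsl_types : List String), Dom_get_imports dsl_types → Spec_get_imports dsl_types (get_imports dsl_types)

-- ===== LEMMAS AND PROOFS =====

-- an infix avoiding the middle character lies in the left or right part
lemma infix_append_cons {p a t : List Char} {c : Char} (hc : c ∉ p) :
    p <:+: a ++ c :: t ↔ p <:+: a ∨ p <:+: t := by
  constructor
  · rintro ⟨u, v, h⟩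
    rw [List.append_assoc] at h
    rcases List.append_eq_append_iff.mp h with ⟨w, hw1, hw2⟩ | ⟨w, hw1, hw2⟩
    · rcases List.append_eq_append_iff.mp hw2 with ⟨w2, h1, h2⟩ | ⟨w2, h1, h2⟩
      · exact Or.inl ⟨u, w2, by rw [hw1, h1, List.append_assoc]⟩
      · cases w2 with
        | nil =>
          simp only [List.append_nil] at h1
          exact Or.inl ⟨u, [], by simp [hw1, h1]⟩
        | cons d w2' =>
          exfalso
          simp only [List.cons_append] at h2
          injection h2 with hd _
          exact hc (by rw [h1, hd]; exact List.mem_append_right _ List.mem_cons_self)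
    · cases w with
      | nil =>
        simp only [List.nil_append] at hw2
        cases p with
        | nil => exact Or.inr ⟨[], t, by simp⟩
        | cons d p' =>
          exfalso
          simp only [List.cons_append] at hw2
          injection hw2 with hd _
          exact hc (by rw [hd]; exact List.mem_cons_self)
      | cons d w' =>
        simp only [List.cons_append] at hw2
        injection hw2 with _ htl
        exact Or.inr ⟨w', v, by rw [htl, List.append_assoc]⟩
  · rintro (⟨u, v, h⟩ | ⟨u, v, h⟩)
    · exact ⟨u, v ++ c :: t, by rw [← h]; simp⟩
    · exact ⟨a ++ c :: u, v, by rw [← h]; simp⟩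

-- a nonempty pattern avoiding the separator matches the join iff it matches some element
lemma infix_join {p : List Char} (hp : p ≠ []) {c : Char} (hc : c ∉ p) (l : List (List Char)) :
    p <:+: PySem.Chars.join [c] l ↔ ∃ s ∈ l, p <:+: s := by
  induction l with
  | nil => simp [PySem.Chars.join_nil, List.infix_nil, hp]
  | cons a rest ih =>
    cases rest with
    | nil => simp [PySem.Chars.join_singleton]
    | cons b r =>
      rw [PySem.Chars.join_cons_cons, List.append_assoc, List.singleton_append,
        infix_append_cons hc, ih]
      simp only [List.mem_cons]
      constructor
      · rintro (h | ⟨s, hs, h⟩)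
        · exact ⟨a, Or.inl rfl, h⟩
        · exact ⟨s, Or.inr hs, h⟩
      · rintro ⟨s, (rfl | hs), h⟩
        · exact Or.inl h
        · exact Or.inr ⟨s, hs, h⟩

-- 'pat in "\n".join(l)' = 'any(pat in t for t in l)' for a nonempty pattern without '\n'
lemma isIn_join (pat : String) (hp : pat.toList ≠ []) (hc : '\n' ∉ pat.toList) (l : List String) :
    PySem.Str.isIn pat (PySem.Str.join "\n" l) = l.any (fun t => PySem.Str.isIn pat t) := by
  rw [Bool.eq_iff_iff, PySem.Str.isIn_iff_infix, PySem.Str.toList_join, List.any_eq_true]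
  have : ("\n" : String).toList = ['\n'] := rfl
  rw [this, infix_join hp hc]
  constructor
  · rintro ⟨s, hs, h⟩
    rcases List.mem_map.mp hs with ⟨t, ht, rfl⟩
    exact ⟨t, ht, (PySem.Str.isIn_iff_infix _ _).mpr h⟩
  · rintro ⟨t, ht, h⟩
    exact ⟨t.toList, List.mem_map.mpr ⟨t, ht, rfl⟩, (PySem.Str.isIn_iff_infix _ _).mp h⟩

-- any over a disjunction of predicates splits into two scans
lemma any_or_split (l : List String) (p q : String → Bool) :
    l.any (fun t => p t || q t) = (l.any p || l.any q) := by
  induction l with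
  | nil => rfl
  | cons t l ih =>
    simp only [List.any_cons, ih]
    cases p t <;> cases q t <;> simp

-- membership after one step of A's loop body
lemma mem_stepA (S : PySem.Set String) (t x : String) :
    x ∈ stepA S t ↔ x ∈ S
      ∨ (x = "#include <vector>" ∧ ((PySem.Str.isIn "List" t || PySem.Str.isIn "[]" t) || PySem.Str.isIn "Graph" t) = true)
      ∨ (x = "#include <string>" ∧ PySem.Str.isIn "string" t = true)
      ∨ (x = "#include <unordered_map>" ∧ PySem.Str.isIn "Graph" t = true) := by
  unfold stepA
  cases h1 : PySem.Str.isIn "List" t <;> cases h2 : PySem.Str.isIn "[]" t <;>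
    cases h3 : PySem.Str.isIn "string" t <;> cases h4 : PySem.Str.isIn "Graph" t <;>
      simp only [h1, h2, h3, h4] <;> simp [PySem.Set.mem_add] <;> tauto

-- membership in A's accumulated set
set_option maxHeartbeats 1000000 in
lemma mem_foldl_stepA (l : List String) (S : PySem.Set String) (x : String) :
    x ∈ l.foldl stepA S ↔ x ∈ S
      ∨ (x = "#include <vector>" ∧ l.any (fun t => (PySem.Str.isIn "List" t || PySem.Str.isIn "[]" t) || PySem.Str.isIn "Graph" t) = true)
      ∨ (x = "#include <string>" ∧ l.any (fun t => PySem.Str.isIn "string" t) = true)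
      ∨ (x = "#include <unordered_map>" ∧ l.any (fun t => PySem.Str.isIn "Graph" t) = true) := by
  induction l generalizing S with
  | nil => simp
  | cons t l ih =>
    rw [List.foldl_cons, ih, mem_stepA]
    simp only [List.any_cons, Bool.or_eq_true]
    tauto

lemma nodup_foldl_stepA (l : List String) (S : PySem.Set String) (hS : S.Nodup) :
    (l.foldl stepA S).Nodup := by
  induction l generalizing S with
  | nil => exact hS
  | cons t l ih =>
    refine ih _ ?_
    unfold stepA
    split_ifs <;> (repeat apply PySem.Set.nodup_add) <;> exact hS

-- ===== VERDICT (by name: the statement is the Claim_ definition above) =====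
set_option maxHeartbeats 1000000 in
theorem get_imports_spec : Claim_equal_get_imports := by
  intro l _
  show get_imports l = get_imports_alt l
  simp only [get_imports, get_imports_alt]
  rw [isIn_join "string" (by decide) (by decide), isIn_join "Graph" (by decide) (by decide),
      isIn_join "List" (by decide) (by decide), isIn_join "[]" (by decide) (by decide)]
  cases hL : l.any (fun t => PySem.Str.isIn "List" t) <;>
    cases hB : l.any (fun t => PySem.Str.isIn "[]" t) <;>
      cases hS : l.any (fun t => PySem.Str.isIn "string" t) <;>
        cases hG : l.any (fun t => PySem.Str.isIn "Graph" t)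
  all_goals
    simp only [Bool.false_or, Bool.true_or, Bool.or_false, Bool.or_true, Bool.false_eq_true,
      if_true, if_false, ite_true, ite_false, ite_self,
      List.nil_append, List.append_nil]
    refine PySem.List.sorted_eq_of_perm_of_pairwise_lt _ _ _
      ((List.perm_ext_iff_of_nodup (by decide)
        (nodup_foldl_stepA l _ List.nodup_nil)).mpr ?_)
      (by simp only [List.pairwise_cons, List.mem_cons, List.mem_singleton,
            List.not_mem_nil, String.lt_iff_toList_lt]; repeat first | decide | constructor | (intro y hy; rcases hy with rfl | hy))
    intro x
    rw [mem_foldl_stepA,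
        any_or_split l (fun t => PySem.Str.isIn "List" t || PySem.Str.isIn "[]" t) (fun t => PySem.Str.isIn "Graph" t),
        any_or_split l (fun t => PySem.Str.isIn "List" t) (fun t => PySem.Str.isIn "[]" t)]
    simp only [hL, hB, hS, hG]
    simp [PySem.Set.empty]
    try tauto
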